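-- pv_equiv track=rewrite | github.com/danielcorsano/reader | reader/text_processing/heading_detector.py | _split_at_headings
-- ===== SOURCE A (Python) =====
-- from typing import Dict, List, Optional, Tuple
--
-- def _split_at_headings(lines: List[str],
--                        headings: List[Tuple[int, str]]) -> List[Dict]:
--     """Split lines into chapters at heading positions."""
--     chapters = []
--
--     # Content before first heading
--     if headings[0][0] > 0:
--         pre_content = '\n'.join(lines[:headings[0][0]]).strip()
--         if pre_content and len(pre_content) > 50:
--             chapters.append({'title': '(Untitled)', 'content': pre_content})
--
--     for idx, (line_idx, title) in enumerate(headings):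
--         if idx + 1 < len(headings):
--             end_idx = headings[idx + 1][0]
--         else:
--             end_idx = len(lines)
--         content = '\n'.join(lines[line_idx + 1:end_idx]).strip()
--         chapters.append({'title': title, 'content': content})
--
--     return chapters
-- ===== SOURCE B (Python) =====
-- from typing import Dict, List, Tuple
--
--
-- def _split_at_headings(lines: List[str],
--                        headings: List[Tuple[int, str]]) -> List[Dict]:
--     """Split lines into chapters: one pre-joined text plus a char-offset table,
--     each chapter is a single substring instead of a join over a list slice."""
--     n = len(lines)
--     offs = [0]
--     total = 0
--     for line in lines:
--         total += len(line) + 1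
--         offs.append(total)
--     text = '\n'.join(lines)
--
--     def clamp(i: int) -> int:
--         # normalize a Python slice bound to [0, n]
--         if i < 0:
--             i += n
--             return 0 if i < 0 else i
--         return n if i > n else i
--
--     def seg(start: int, stop: int) -> str:
--         a, b = clamp(start), clamp(stop)
--         if a >= b:
--             return ''
--         return text[offs[a]:offs[b] - 1]
--
--     chapters = []
--     if headings[0][0] > 0:
--         pre_content = seg(0, headings[0][0]).strip()
--         if pre_content and len(pre_content) > 50:
--             chapters.append({'title': '(Untitled)', 'content': pre_content})
--     bounds = [line_idx for line_idx, _ in headings[1:]] + [n]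
--     for (line_idx, title), end in zip(headings, bounds):
--         chapters.append({'title': title, 'content': seg(line_idx + 1, end).strip()})
--     return chapters
-- ===== Notes on version B (the rewrite author's own statement) =====
-- stated objective: alternative
-- what changed: B joins all lines into one text once and builds a prefix table of character offsets, producing each chapter (and the pre-heading segment) as a single substring text[offs[a]:offs[b]-1] with explicit slice-bound clamping, instead of A's per-chapter list slice re-joined with '\n'.
import Mathlib
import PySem

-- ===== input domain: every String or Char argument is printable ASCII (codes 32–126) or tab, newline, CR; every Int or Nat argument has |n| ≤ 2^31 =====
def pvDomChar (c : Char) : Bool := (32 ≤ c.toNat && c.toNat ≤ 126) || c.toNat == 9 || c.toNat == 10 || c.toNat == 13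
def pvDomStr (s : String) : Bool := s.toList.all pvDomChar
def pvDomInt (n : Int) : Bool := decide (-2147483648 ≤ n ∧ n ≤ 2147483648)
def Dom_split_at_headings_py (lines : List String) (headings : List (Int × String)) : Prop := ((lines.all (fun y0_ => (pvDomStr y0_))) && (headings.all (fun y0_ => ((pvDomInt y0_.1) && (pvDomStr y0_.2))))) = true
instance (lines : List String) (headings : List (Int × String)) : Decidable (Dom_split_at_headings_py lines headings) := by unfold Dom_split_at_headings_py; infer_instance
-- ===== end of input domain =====

-- B joins the lines once and indexes the joined text through a prefix char-offset table, taking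
-- each chapter as one substring, instead of A's per-chapter list-slice + join; same cost overall.

-- ===== PORT A =====
def split_at_headings_py (lines : List String) (headings : List (Int × String)) : List (List (String × String)) :=
  match headings with
  | [] => []  -- Python raises IndexError on headings[0]; excluded by Pre_
  | (h0, _) :: _ =>
    let chapters : List (List (String × String)) :=
      if h0 > 0 then
        let pre_content := PySem.Str.strip (PySem.Str.join "\n" (PySem.List.slice lines none (some h0)))
        if pre_content ≠ "" ∧ PySem.Str.len pre_content > 50 then
          [[("title", "(Untitled)"), ("content", pre_content)]]
        else []
      else []
    (headings.zipIdx).foldl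
      (fun cs p =>
        let end_idx : Int :=
          if p.2 + 1 < headings.length then (headings.getD (p.2 + 1) (0, "")).1
          else (lines.length : Int)
        cs ++ [[("title", p.1.2), ("content",
          PySem.Str.strip (PySem.Str.join "\n" (PySem.List.slice lines (some (p.1.1 + 1)) (some end_idx))))]])
      chapters

-- ===== PORT B =====
-- helper clamp of Source B: normalize a Python slice bound to [0, n]
def pvClamp (n : Nat) (i : Int) : Int :=
  if i < 0 then
    (if i + n < 0 then 0 else i + n)
  else (if i > n then (n : Int) else i)

-- helper seg of Source B: the substring of the joined text between two line bounds
def pvSeg (text : String) (offs : List Int) (n : Nat) (start stop : Int) : String :=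
  let a := pvClamp n start
  let b := pvClamp n stop
  if a ≥ b then ""
  else PySem.Str.slice text (some (PySem.List.pyGetD offs a 0)) (some (PySem.List.pyGetD offs b 0 - 1))

def split_at_headings_py_alt (lines : List String) (headings : List (Int × String)) : List (List (String × String)) :=
  match headings with
  | [] => []  -- Source B raises IndexError on headings[0][0] too; excluded by Pre_
  | (h0, _) :: _ =>
    let n := lines.length
    let offs := (lines.foldl
      (fun (p : List Int × Int) line =>
        (p.1 ++ [p.2 + PySem.Str.len line + 1], p.2 + PySem.Str.len line + 1))
      ([0], 0)).1
    let text := PySem.Str.join "\n" lines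
    let chapters : List (List (String × String)) :=
      if h0 > 0 then
        let pre_content := PySem.Str.strip (pvSeg text offs n 0 h0)
        if pre_content ≠ "" ∧ PySem.Str.len pre_content > 50 then
          [[("title", "(Untitled)"), ("content", pre_content)]]
        else []
      else []
    let bounds := (headings.drop 1).map (·.1) ++ [(n : Int)]
    (headings.zip bounds).foldl
      (fun cs p => cs ++ [[("title", p.1.2), ("content",
        PySem.Str.strip (pvSeg text offs n (p.1.1 + 1) p.2))]])
      chapters

-- ===== PRECONDITION & SPEC =====
-- Pre_ excludes only headings = [], where both Pythons raise IndexError on headings[0].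
def Pre_split_at_headings_py (lines : List String) (headings : List (Int × String)) : Prop :=
  headings ≠ []
instance (lines : List String) (headings : List (Int × String)) : Decidable (Pre_split_at_headings_py lines headings) := by unfold Pre_split_at_headings_py; infer_instance
def pvWitness_split_at_headings_py : List String × (List (Int × String)) := (["a", "b", "c"], [(1, "T")])

def Spec_split_at_headings_py (lines : List String) (headings : List (Int × String)) (out : List (List (String × String))) : Prop := out = split_at_headings_py_alt lines headings
instance (lines : List String) (headings : List (Int × String)) (out : List (List (String × String))) : Decidable (Spec_split_at_headings_py lines headings out) := by unfold Spec_split_at_headings_py; infer_instance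

-- ===== CLAIM (what is proved, stated in full; the proofs are below) =====
def Claim_equal_split_at_headings_py : Prop := ∀ (lines : List String) (headings : List (Int × String)), Dom_split_at_headings_py lines headings → Pre_split_at_headings_py lines headings → Spec_split_at_headings_py lines headings (split_at_headings_py lines headings)

-- ===== LEMMAS AND PROOFS =====

-- A-side normal form: chapters as slices between consecutive heading indices.
def pvChap (lines : List String) (li e : Int) (ti : String) : List (String × String) :=
  [("title", ti), ("content",
    PySem.Str.strip (PySem.Str.join "\n" (PySem.List.slice lines (some (li + 1)) (some e))))]
def pvEndOf (lines : List String) : List (Int × String) → Int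
  | [] => (lines.length : Int)
  | (n, _) :: _ => n
def pvGo (lines : List String) : List (Int × String) → List (List (String × String))
  | [] => []
  | (li, ti) :: rest => pvChap lines li (pvEndOf lines rest) ti :: pvGo lines rest

lemma pvFoldA (lines : List String) (headings : List (Int × String)) :
    ∀ (suf pre : List (Int × String)) (cs : List (List (String × String))),
      headings = pre ++ suf →
      (suf.zipIdx pre.length).foldl
        (fun cs p =>
          let end_idx : Int :=
            if p.2 + 1 < headings.length then (headings.getD (p.2 + 1) (0, "")).1
            else (lines.length : Int)
          cs ++ [[("title", p.1.2), ("content",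
            PySem.Str.strip (PySem.Str.join "\n" (PySem.List.slice lines (some (p.1.1 + 1)) (some end_idx))))]])
        cs = cs ++ pvGo lines suf := by
  intro suf
  induction suf with
  | nil => intro pre cs h; simp [pvGo]
  | cons x rest ih =>
    intro pre cs h
    obtain ⟨li, ti⟩ := x
    rw [List.zipIdx_cons, List.foldl_cons]
    have hend : (if pre.length + 1 < headings.length then (headings.getD (pre.length + 1) (0, "")).1
        else (lines.length : Int)) =
        pvEndOf lines rest := by
      subst h
      cases rest with
      | nil => simp [pvEndOf]
      | cons hd tl =>
        obtain ⟨n, sn⟩ := hd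
        rw [if_pos (by simp only [List.length_append, List.length_cons]; omega)]
        have hg : (pre ++ (li, ti) :: (n, sn) :: tl).getD (pre.length + 1) (0, "") = (n, sn) := by
          rw [List.getD_eq_getElem?_getD, List.getElem?_append_right (by omega)]
          simp
        rw [hg]; rfl
    have h2 : headings = (pre ++ [(li, ti)]) ++ rest := by simp [h]
    have key := ih (pre ++ [(li, ti)]) (cs ++ [[("title", ti), ("content",
      PySem.Str.strip (PySem.Str.join "\n" (PySem.List.slice lines (some (li + 1)) (some
        (if pre.length + 1 < headings.length then (headings.getD (pre.length + 1) (0, "")).1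
         else (lines.length : Int))))))]]) h2
    simp only [List.length_append, List.length_cons, List.length_nil] at key
    exact key.trans (by rw [hend]; simp only [pvGo, pvChap, List.append_assoc, List.singleton_append])

-- the character offset of the start of line a in the joined text
def pvSumLen (ls : List String) : Nat := ((ls.map (fun s => s.toList.length + 1)).sum)
def pvOffsF (ls : List String) (a : Nat) : Nat := pvSumLen (ls.take a)

-- the totals produced by B's offset loop
def pvTotals (t : Int) : List String → List Int
  | [] => []
  | s :: rest => (t + PySem.Str.len s + 1) :: pvTotals (t + PySem.Str.len s + 1) rest

lemma pvFoldOffs (ls : List String) :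
    ∀ (pref : List Int) (t : Int),
      ls.foldl (fun (p : List Int × Int) line =>
          (p.1 ++ [p.2 + PySem.Str.len line + 1], p.2 + PySem.Str.len line + 1)) (pref, t)
        = (pref ++ pvTotals t ls, t + (pvSumLen ls : Int)) := by
  induction ls with
  | nil => intro pref t; simp [pvTotals, pvSumLen]
  | cons s rest ih =>
    intro pref t
    rw [List.foldl_cons, ih]
    simp only [pvTotals, pvSumLen, List.map_cons, List.sum_cons, PySem.Str.len_eq,
      Prod.mk.injEq]
    refine ⟨by simp, by push_cast; ring⟩

lemma pvTotalsGet (ls : List String) :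
    ∀ (t : Int) (j : Nat), j < ls.length →
      (pvTotals t ls)[j]? = some (t + (pvOffsF ls (j + 1) : Int)) := by
  induction ls with
  | nil => intro t j h; simp at h
  | cons s rest ih =>
    intro t j h
    cases j with
    | zero =>
      simp [pvTotals, pvOffsF, pvSumLen, PySem.Str.len_eq]
      ring
    | succ j =>
      rw [show pvTotals t (s :: rest) = (t + PySem.Str.len s + 1) :: pvTotals (t + PySem.Str.len s + 1) rest from rfl]
      rw [List.getElem?_cons_succ, ih _ j (by simpa using h)]
      simp only [pvOffsF, pvSumLen, List.take_succ_cons, List.map_cons, List.sum_cons,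
        PySem.Str.len_eq]
      push_cast
      ring_nf

lemma pvOffsGet (lines : List String) (a : Nat) (ha : a ≤ lines.length) :
    PySem.List.pyGetD ((0 : Int) :: pvTotals 0 lines) ((a : Nat) : Int) 0
      = (pvOffsF lines a : Int) := by
  rw [PySem.List.pyGetD_natCast]
  cases a with
  | zero => simp [pvOffsF, pvSumLen]
  | succ a =>
    rw [List.getD_eq_getElem?_getD, List.getElem?_cons_succ,
      pvTotalsGet lines 0 a (by omega)]
    simp

-- dropping up to line a in the joined character list
lemma pvJoinDrop (a : Nat) : ∀ (ls : List String), a < ls.length →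
    (PySem.Chars.join ['\n'] (ls.map String.toList)).drop (pvOffsF ls a)
      = PySem.Chars.join ['\n'] ((ls.drop a).map String.toList) := by
  induction a with
  | zero => intro ls _; simp [pvOffsF, pvSumLen]
  | succ a ih =>
    intro ls h
    match ls, h with
    | s :: r :: rs, h =>
      have hj : PySem.Chars.join ['\n'] ((s :: r :: rs).map String.toList)
          = (s.toList ++ ['\n']) ++ PySem.Chars.join ['\n'] ((r :: rs).map String.toList) := by
        simp [PySem.Chars.join_cons_cons]
      rw [hj]
      have hoff : pvOffsF (s :: r :: rs) (a + 1)
          = (s.toList ++ ['\n']).length + pvOffsF (r :: rs) a := by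
        simp [pvOffsF, pvSumLen]
      rw [hoff, List.drop_append,
        List.drop_eq_nil_of_le (as := s.toList ++ ['\n']) (by simp),
        show (s.toList ++ ['\n']).length + pvOffsF (r :: rs) a - (s.toList ++ ['\n']).length
          = pvOffsF (r :: rs) a by omega,
        ih (r :: rs) (by simpa using h)]
      simp

lemma pvOffsFGe (ls : List String) (c : Nat) (hc : c ≤ ls.length) : c ≤ pvOffsF ls c := by
  induction ls generalizing c with
  | nil =>
    have hc0 : c = 0 := by simpa using hc
    subst hc0
    simp [pvOffsF, pvSumLen]
  | cons x xs ih =>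
    cases c with
    | zero => omega
    | succ c =>
      have := ih c (by simpa using hc)
      simp only [pvOffsF, pvSumLen, List.take_succ_cons, List.map_cons, List.sum_cons] at *
      omega

lemma pvJoinTake : ∀ (ls : List String) (b : Nat), 0 < b → b ≤ ls.length →
    (PySem.Chars.join ['\n'] (ls.map String.toList)).take (pvOffsF ls b - 1)
      = PySem.Chars.join ['\n'] ((ls.take b).map String.toList) := by
  intro ls
  induction ls with
  | nil => intro b h1 h2; simp at h2; omega
  | cons s rest ih =>
    intro b h1 h2
    cases b with
    | zero => omega
    | succ b =>
      cases b with
      | zero =>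
        have hoff : pvOffsF (s :: rest) 1 - 1 = s.toList.length := by
          simp [pvOffsF, pvSumLen]
        rw [hoff]
        cases rest with
        | nil => simp [PySem.Chars.join_singleton]
        | cons r rs =>
          have hj : PySem.Chars.join ['\n'] ((s :: r :: rs).map String.toList)
              = s.toList ++ (['\n'] ++ PySem.Chars.join ['\n'] ((r :: rs).map String.toList)) := by
            simp [PySem.Chars.join_cons_cons]
          rw [hj, List.take_append_of_le_length le_rfl, List.take_length]
          simp [PySem.Chars.join_singleton]
      | succ b =>
        cases rest with
        | nil => simp at h2
        | cons r rs =>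
          have hge : b + 1 ≤ pvOffsF (r :: rs) (b + 1) :=
            pvOffsFGe (r :: rs) (b + 1) (by simpa using h2)
          have hj : PySem.Chars.join ['\n'] ((s :: r :: rs).map String.toList)
              = (s.toList ++ ['\n']) ++ PySem.Chars.join ['\n'] ((r :: rs).map String.toList) := by
            simp [PySem.Chars.join_cons_cons]
          have hoff : pvOffsF (s :: r :: rs) (b + 1 + 1) - 1
              = (s.toList ++ ['\n']).length + (pvOffsF (r :: rs) (b + 1) - 1) := by
            simp only [pvOffsF, pvSumLen, List.take_succ_cons, List.map_cons, List.sum_cons,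
              List.length_append, List.length_cons, List.length_nil]
            omega
          rw [hj, hoff, List.take_append,
            List.take_of_length_le (l := s.toList ++ ['\n']) (by simp),
            show (s.toList ++ ['\n']).length + (pvOffsF (r :: rs) (b + 1) - 1)
              - (s.toList ++ ['\n']).length = pvOffsF (r :: rs) (b + 1) - 1 by omega,
            ih (b + 1) (by omega) (by simpa using h2)]
          have hjt : PySem.Chars.join ['\n'] (((s :: r :: rs).take (b + 1 + 1)).map String.toList)
              = (s.toList ++ ['\n']) ++ PySem.Chars.join ['\n'] (((r :: rs).take (b + 1)).map String.toList) := by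
            cases hrs : (r :: rs).take (b + 1) with
            | nil => simp at hrs
            | cons q qs =>
              simp only [List.take_succ_cons, List.map_cons, hrs]
              simp [PySem.Chars.join_cons_cons]
          rw [hjt]

lemma pvOffsFAdd (ls : List String) (a b : Nat) (hab : a ≤ b) :
    pvOffsF ls b = pvOffsF ls a + pvOffsF (ls.drop a) (b - a) := by
  unfold pvOffsF
  rw [show b = a + (b - a) by omega, List.take_add]
  simp [pvSumLen, Nat.add_sub_cancel_left]

-- the main character-level fact: a substring of the joined text between line offsets
-- IS the join of the corresponding line range
lemma pvSliceChars (lines : List String) (a b : Nat) (hab : a < b) (hb : b ≤ lines.length) :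
    PySem.Chars.slice (PySem.Chars.join ['\n'] (lines.map String.toList))
        (some ((pvOffsF lines a : Nat) : Int)) (some (((pvOffsF lines b : Nat) : Int) - 1))
      = PySem.Chars.join ['\n'] (((lines.drop a).take (b - a)).map String.toList) := by
  have hbge : 1 ≤ pvOffsF lines b := le_trans (by omega) (pvOffsFGe lines b hb)
  rw [PySem.Chars.slice_eq_listSlice]
  rw [PySem.List.slice_toNat _ (by positivity) (by push_cast; omega)]
  rw [show ((pvOffsF lines a : Nat) : Int).toNat = pvOffsF lines a by omega]
  rw [show (((pvOffsF lines b : Nat) : Int) - 1).toNat = pvOffsF lines b - 1 by omega]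
  rw [pvJoinDrop a lines (by omega)]
  have hadd := pvOffsFAdd lines a b (by omega)
  have hge2 : b - a ≤ pvOffsF (lines.drop a) (b - a) :=
    pvOffsFGe (lines.drop a) (b - a) (by simp [List.length_drop]; omega)
  rw [show pvOffsF lines b - 1 - pvOffsF lines a = pvOffsF (lines.drop a) (b - a) - 1 by omega]
  exact pvJoinTake (lines.drop a) (b - a) (by omega) (by simp [List.length_drop]; omega)

lemma pvClampEq (n : Nat) (i : Int) : pvClamp n i = ((PySem.List.clampIdx n i : Nat) : Int) := by
  unfold pvClamp PySem.List.clampIdx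
  split_ifs <;> omega

-- B's seg+strip is A's slice+join+strip, for arbitrary Int bounds
lemma pvSegEq (lines : List String) (s e : Int) :
    PySem.Str.strip (pvSeg (PySem.Str.join "\n" lines) ((0 : Int) :: pvTotals 0 lines)
        lines.length s e)
      = PySem.Str.strip (PySem.Str.join "\n" (PySem.List.slice lines (some s) (some e))) := by
  have hsl : PySem.List.slice lines (some s) (some e)
      = (lines.drop (PySem.List.clampIdx lines.length s)).take
          (PySem.List.clampIdx lines.length e - PySem.List.clampIdx lines.length s) := rfl
  set ca := PySem.List.clampIdx lines.length s with hca
  set cb := PySem.List.clampIdx lines.length e with hcb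
  have hcble : cb ≤ lines.length := PySem.List.clampIdx_le _ _
  have hcale : ca ≤ lines.length := PySem.List.clampIdx_le _ _
  unfold pvSeg
  rw [pvClampEq lines.length s, pvClampEq lines.length e, ← hca, ← hcb]
  by_cases hab : ((ca : Nat) : Int) ≥ ((cb : Nat) : Int)
  · rw [if_pos hab, hsl]
    rw [show cb - ca = 0 by omega]
    simp
    rfl
  · rw [if_neg hab]
    have hab' : ca < cb := by omega
    rw [pvOffsGet lines ca hcale, pvOffsGet lines cb hcble]
    rw [← String.toList_inj]
    rw [PySem.Str.toList_strip, PySem.Str.toList_strip]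
    refine congrArg PySem.Chars.strip ?_
    rw [PySem.Str.toList_slice, PySem.Str.toList_join, PySem.Str.toList_join]
    rw [show ("\n" : String).toList = ['\n'] from rfl]
    rw [hsl]
    exact pvSliceChars lines ca cb hab' hcble

-- B's zip loop produces exactly A's chapter list
lemma pvFoldBzip (lines : List String) :
    ∀ (hs : List (Int × String)) (cs : List (List (String × String))),
      (hs.zip ((hs.drop 1).map (·.1) ++ [(lines.length : Int)])).foldl
        (fun cs p => cs ++ [[("title", p.1.2), ("content",
          PySem.Str.strip (pvSeg (PySem.Str.join "\n" lines) ((0 : Int) :: pvTotals 0 lines)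
            lines.length (p.1.1 + 1) p.2))]])
        cs = cs ++ pvGo lines hs := by
  intro hs
  induction hs with
  | nil => intro cs; simp [pvGo]
  | cons a rest ih =>
    intro cs
    obtain ⟨li, ti⟩ := a
    have hz : (((li, ti) :: rest).zip ((((li, ti) :: rest).drop 1).map (·.1) ++ [(lines.length : Int)]))
        = ((li, ti), pvEndOf lines rest) :: (rest.zip ((rest.drop 1).map (·.1) ++ [(lines.length : Int)])) := by
      cases rest with
      | nil => rfl
      | cons b tl =>
        obtain ⟨m, sn⟩ := b
        rfl
    rw [hz, List.foldl_cons, ih, pvSegEq lines (li + 1) (pvEndOf lines rest)]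
    simp [pvGo, pvChap]

-- ===== VERDICT (by name: the statement is the Claim_ definition above) =====
theorem split_at_headings_py_spec : Claim_equal_split_at_headings_py := by
  intro lines headings _ hpre
  unfold Spec_split_at_headings_py
  cases headings with
  | nil => exact absurd rfl hpre
  | cons a rest =>
    obtain ⟨h0, t0⟩ := a
    -- normalize A
    simp only [split_at_headings_py]
    rw [show (((h0, t0) :: rest)).zipIdx
        = (((h0, t0) :: rest)).zipIdx (List.length ([] : List (Int × String))) from rfl]
    rw [pvFoldA lines ((h0, t0) :: rest) ((h0, t0) :: rest) [] _ rfl]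
    -- normalize B
    simp only [split_at_headings_py_alt]
    rw [pvFoldOffs lines [0] 0]
    rw [show (([0] ++ pvTotals 0 lines, (0 : Int) + (pvSumLen lines : Int))).1
        = (0 : Int) :: pvTotals 0 lines by simp]
    rw [pvFoldBzip lines ((h0, t0) :: rest)]
    -- the pre-heading chapter agrees
    rw [pvSegEq lines 0 h0]
    rw [show PySem.List.slice lines (some 0) (some h0) = PySem.List.slice lines none (some h0) from
      PySem.List.slice_zero_start lines (some h0)]
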